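-- pv_equiv track=rewrite | github.com/concaf/hubops | systems/apache/level_1/task_1/task_1.py | search_images_local
-- ===== SOURCE A (Python) =====
-- def search_images_local(image_list, user_repotag):
--     local_repotags = list()
--     for image_name in image_list:
--         for separate_tags in image_name['RepoTags']:
--             local_repotags.append(separate_tags)
--
--     if user_repotag in local_repotags:
--         return True
--     else:
--         return False
-- ===== SOURCE B (Python) =====
-- def search_images_local(image_list, user_repotag):
--     # Recursive decomposition: head/tail, short-circuiting on the first match.
--     if not image_list:
--         return False
--     return user_repotag in image_list[0]['RepoTags'] or \
--         search_images_local(image_list[1:], user_repotag)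
-- ===== Notes on version B (the rewrite author's own statement) =====
-- stated objective: simpler
-- what changed: Replaces A's two-phase build-a-flattened-tag-list-then-scan with a head/tail recursion that checks membership in the first image's RepoTags and short-circuits via 'or', maintaining no intermediate collection.
import Mathlib
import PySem

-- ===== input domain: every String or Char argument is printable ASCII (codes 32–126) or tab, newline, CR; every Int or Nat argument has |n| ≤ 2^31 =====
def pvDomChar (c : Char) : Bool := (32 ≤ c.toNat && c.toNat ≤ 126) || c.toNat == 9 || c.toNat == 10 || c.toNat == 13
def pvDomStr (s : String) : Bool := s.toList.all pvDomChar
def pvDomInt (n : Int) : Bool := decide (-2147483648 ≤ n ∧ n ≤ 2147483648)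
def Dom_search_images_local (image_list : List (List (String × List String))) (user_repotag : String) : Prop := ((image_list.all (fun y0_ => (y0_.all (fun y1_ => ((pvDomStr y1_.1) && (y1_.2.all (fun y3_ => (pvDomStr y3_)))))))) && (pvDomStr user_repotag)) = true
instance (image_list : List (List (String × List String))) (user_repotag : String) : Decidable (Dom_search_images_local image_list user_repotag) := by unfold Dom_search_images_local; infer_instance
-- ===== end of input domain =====

-- B replaces A's build-full-flattened-list-then-scan with a head/tail recursion
-- that short-circuits on the first matching image (objective: simpler).

-- ===== PORT A =====
-- A: flatten every image's 'RepoTags' into local_repotags, then membership test.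
-- image['RepoTags'] is assoc-list lookup; Pre_ guarantees the key exists, so getD [] is never taken.
def search_images_local (image_list : List (List (String × List String))) (user_repotag : String) : Bool :=
  let local_repotags :=
    image_list.foldl
      (fun acc image_name =>
        ((image_name.lookup "RepoTags").getD []).foldl (fun a separate_tags => a ++ [separate_tags]) acc)
      []
  if user_repotag ∈ local_repotags then true else false

-- ===== PORT B =====
-- B: if not image_list: return False; else membership in head's RepoTags or recurse on the tail.
def search_images_local_alt : List (List (String × List String)) → String → Bool
  | [], _ => false
  | image :: rest, user_repotag =>
      ((image.lookup "RepoTags").getD []).contains user_repotag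
        || search_images_local_alt rest user_repotag

-- ===== PRECONDITION & SPEC =====
-- Pre_ excludes inputs where some image dict lacks the 'RepoTags' key: there A raises KeyError.
def Pre_search_images_local (image_list : List (List (String × List String))) (user_repotag : String) : Prop :=
  ∀ image_name ∈ image_list, (image_name.lookup "RepoTags").isSome = true
instance (image_list : List (List (String × List String))) (user_repotag : String) : Decidable (Pre_search_images_local image_list user_repotag) := by unfold Pre_search_images_local; infer_instance

def pvWitness_search_images_local : (List (List (String × List String))) × String :=
  ([[("RepoTags", ["nginx:latest", "nginx:1.0"])], [("RepoTags", [])]], "nginx:1.0")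

def Spec_search_images_local (image_list : List (List (String × List String))) (user_repotag : String) (out : Bool) : Prop := out = search_images_local_alt image_list user_repotag
instance (image_list : List (List (String × List String))) (user_repotag : String) (out : Bool) : Decidable (Spec_search_images_local image_list user_repotag out) := by unfold Spec_search_images_local; infer_instance

-- ===== CLAIM (what is proved, stated in full; the proofs are below) =====
def Claim_equal_search_images_local : Prop := ∀ (image_list : List (List (String × List String))) (user_repotag : String), Dom_search_images_local image_list user_repotag → Pre_search_images_local image_list user_repotag → Spec_search_images_local image_list user_repotag (search_images_local image_list user_repotag)

-- ===== LEMMAS AND PROOFS =====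
-- A's flattening loop builds acc ++ flatMap of the tag lists.
theorem search_flatten_eq (image_list : List (List (String × List String))) (acc : List String) :
    image_list.foldl
      (fun acc image_name =>
        ((image_name.lookup "RepoTags").getD []).foldl (fun a separate_tags => a ++ [separate_tags]) acc)
      acc
    = acc ++ image_list.flatMap (fun image_name => (image_name.lookup "RepoTags").getD []) := by
  simp only [PySem.List.foldl_append_singleton_eq_self]
  exact PySem.List.foldl_append_eq_flatMap _ _ _

-- B's recursion decides membership in the flattened tag list.
theorem alt_eq_mem_flatMap (image_list : List (List (String × List String))) (t : String) :
    search_images_local_alt image_list t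
      = decide (t ∈ image_list.flatMap (fun image_name => (image_name.lookup "RepoTags").getD [])) := by
  induction image_list with
  | nil => simp [search_images_local_alt]
  | cons img rest ih =>
      simp [search_images_local_alt, ih, List.flatMap_cons, List.mem_append]

-- ===== VERDICT (by name: the statement is the Claim_ definition above) =====
theorem search_images_local_spec : Claim_equal_search_images_local := by
  intro image_list user_repotag _ _
  unfold Spec_search_images_local search_images_local
  simp only [search_flatten_eq, List.nil_append, alt_eq_mem_flatMap]
  by_cases h : user_repotag ∈ image_list.flatMap (fun image_name => (image_name.lookup "RepoTags").getD []) <;> simp [h]
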